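-- pv_equiv track=rewrite | github.com/pratit989/JARVIS | J.A.R.V.I.S._Mark_II.py | get_weather
-- ===== SOURCE A (Python) =====
-- def get_weather(weather_and_temperature_dict, voice_note_para):
--     for key_var, value_var in weather_and_temperature_dict.items():
--         try:
--             if key_var == voice_note_para.split(' ')[0]:
--                 return True
--             elif value_var == voice_note_para.split(' ')[1]:
--                 return True
--             elif key_var == voice_note_para.split(' ')[2]:
--                 return True
--             elif value_var == voice_note_para.split(' ')[3]:
--                 return True
--             elif key_var == voice_note_para.split(' ')[4]:
--                 return True
--             elif value_var == voice_note_para.split(' ')[5]: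
--                 return True
--             elif key_var == voice_note_para.split(' ')[6]:
--                 return True
--             elif value_var == voice_note_para.split(' ')[7]:
--                 return True
--             elif key_var == voice_note_para.split(' ')[8]:
--                 return True
--         except IndexError:
--             pass
--     return False
-- ===== SOURCE B (Python) =====
-- def get_weather(weather_and_temperature_dict, voice_note_para):
--     words = voice_note_para.split(' ')[:9]
--     values = weather_and_temperature_dict.values()
--     for i, word in enumerate(words):
--         if i % 2 == 0:
--             if word in weather_and_temperature_dict:
--                 return True
--         else:
--             if word in values:
--                 return True
--     return False
-- ===== Notes on version B (the rewrite author's own statement) =====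
-- stated objective: faster
-- what changed: Inverted the traversal: instead of scanning every dict entry against nine fixed word positions, re-splitting the whole sentence for every comparison inside a try/except chain, B splits the sentence once, keeps the first 9 words, and loops over word positions, testing even positions for key membership and odd positions for value membership.
import Mathlib
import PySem

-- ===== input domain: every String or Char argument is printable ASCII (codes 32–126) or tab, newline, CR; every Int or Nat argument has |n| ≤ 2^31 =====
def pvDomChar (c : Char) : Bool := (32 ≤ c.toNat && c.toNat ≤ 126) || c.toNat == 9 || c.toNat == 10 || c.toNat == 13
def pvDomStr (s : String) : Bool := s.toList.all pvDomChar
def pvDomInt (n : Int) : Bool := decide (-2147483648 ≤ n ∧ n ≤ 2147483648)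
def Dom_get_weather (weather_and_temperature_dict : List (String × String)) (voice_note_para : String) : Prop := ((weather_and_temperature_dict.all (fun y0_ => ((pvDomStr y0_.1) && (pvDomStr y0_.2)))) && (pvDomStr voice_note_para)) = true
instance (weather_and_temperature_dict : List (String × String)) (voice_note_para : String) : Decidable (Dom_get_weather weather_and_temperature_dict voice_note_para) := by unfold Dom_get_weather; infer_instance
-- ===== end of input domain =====

-- B inverts the traversal: one split (A re-splits the sentence for every comparison), loop over the first 9 word positions with key/value membership tests (objective: faster, measured).


-- ===== PORT A =====
-- the try-guarded if/elif chain of A for one dict entry: each index access may raise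
-- IndexError, which the except swallows (→ false for the rest of the chain)
def pvCheckEntry (key_var value_var : String) (words : List String) : Bool :=
  match PySem.List.pyGet? words 0 with
  | none => false
  | some w0 => if key_var == w0 then true else
    match PySem.List.pyGet? words 1 with
    | none => false
    | some w1 => if value_var == w1 then true else
      match PySem.List.pyGet? words 2 with
      | none => false
      | some w2 => if key_var == w2 then true else
        match PySem.List.pyGet? words 3 with
        | none => false
        | some w3 => if value_var == w3 then true else
          match PySem.List.pyGet? words 4 with
          | none => false
          | some w4 => if key_var == w4 then true else
            match PySem.List.pyGet? words 5 with
            | none => false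
            | some w5 => if value_var == w5 then true else
              match PySem.List.pyGet? words 6 with
              | none => false
              | some w6 => if key_var == w6 then true else
                match PySem.List.pyGet? words 7 with
                | none => false
                | some w7 => if value_var == w7 then true else
                  match PySem.List.pyGet? words 8 with
                  | none => false
                  | some w8 => key_var == w8

-- split? with the literal nonempty separator " " is always `some`; .getD [] only totalises it
def get_weather (weather_and_temperature_dict : List (String × String)) (voice_note_para : String) : Bool :=
  weather_and_temperature_dict.any (fun kv =>
    pvCheckEntry kv.1 kv.2 (((PySem.Str.split? voice_note_para " ").getD [])))

-- ===== PORT B =====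
def get_weather_alt (weather_and_temperature_dict : List (String × String)) (voice_note_para : String) : Bool :=
  let words := PySem.List.slice (((PySem.Str.split? voice_note_para " ").getD [])) none (some 9)
  let values := weather_and_temperature_dict.map (·.2)
  (PySem.List.enumerate words 0).any (fun iw =>
    if PySem.Int.mod iw.1 2 == 0 then
      (weather_and_temperature_dict.map (·.1)).contains iw.2
    else
      values.contains iw.2)

-- ===== PRECONDITION & SPEC =====
def Spec_get_weather (weather_and_temperature_dict : List (String × String)) (voice_note_para : String) (out : Bool) : Prop := out = get_weather_alt weather_and_temperature_dict voice_note_para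
instance (weather_and_temperature_dict : List (String × String)) (voice_note_para : String) (out : Bool) : Decidable (Spec_get_weather weather_and_temperature_dict voice_note_para out) := by unfold Spec_get_weather; infer_instance

-- ===== CLAIM (what is proved, stated in full; the proofs are below) =====
def Claim_equal_get_weather : Prop := ∀ (weather_and_temperature_dict : List (String × String)) (voice_note_para : String), Dom_get_weather weather_and_temperature_dict voice_note_para → Spec_get_weather weather_and_temperature_dict voice_note_para (get_weather weather_and_temperature_dict voice_note_para)

-- ===== LEMMAS AND PROOFS =====

-- one dict entry's try-guarded if/elif chain equals a positional scan of the first 9 words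
theorem pvCheckEntry_eq (k v : String) (ws : List String) :
    pvCheckEntry k v ws =
      (PySem.List.enumerate (PySem.List.slice ws none (some 9)) 0).any (fun iw =>
        if PySem.Int.mod iw.1 2 == 0 then iw.2 == k else iw.2 == v) := by
  rcases ws with _|⟨a0,_|⟨a1,_|⟨a2,_|⟨a3,_|⟨a4,_|⟨a5,_|⟨a6,_|⟨a7,_|⟨a8,rest⟩⟩⟩⟩⟩⟩⟩⟩⟩ <;>
    rw [Bool.eq_iff_iff] <;>
    simp [pvCheckEntry, PySem.List.pyGet?_of_nonneg, PySem.List.slice, PySem.List.enumerate,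
      PySem.Int.mod] <;> tauto

-- ===== VERDICT (by name: the statement is the Claim_ definition above) =====
theorem get_weather_spec : Claim_equal_get_weather := by
  intro d p _
  unfold Spec_get_weather get_weather get_weather_alt
  simp only [pvCheckEntry_eq]
  rw [Bool.eq_iff_iff]
  simp only [List.any_eq_true, List.contains_eq_mem, List.mem_map, beq_iff_eq]
  constructor
  · rintro ⟨kv, hkv, iw, hiw, h⟩
    refine ⟨iw, hiw, ?_⟩
    by_cases hm : PySem.Int.mod iw.1 2 = 0
    · rw [if_pos hm] at h ⊢; simp only [beq_iff_eq] at h; exact decide_eq_true ⟨kv, hkv, h.symm⟩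
    · rw [if_neg hm] at h ⊢; simp only [beq_iff_eq] at h; exact decide_eq_true ⟨kv, hkv, h.symm⟩
  · rintro ⟨iw, hiw, h⟩
    by_cases hm : PySem.Int.mod iw.1 2 = 0
    · rw [if_pos hm] at h; obtain ⟨kv, hkv, hx⟩ := of_decide_eq_true h
      exact ⟨kv, hkv, iw, hiw, by rw [if_pos hm]; exact beq_iff_eq.mpr hx.symm⟩
    · rw [if_neg hm] at h; obtain ⟨kv, hkv, hx⟩ := of_decide_eq_true h
      exact ⟨kv, hkv, iw, hiw, by rw [if_neg hm]; exact beq_iff_eq.mpr hx.symm⟩
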